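-- pv_equiv track=rewrite | github.com/ali-mzhr/chi-task | countMin.py | countMin
-- ===== SOURCE A (Python) =====
-- def countMin(str):
--     length = len(str)
--     ln = length//2
--     equ = 0
--     if(length%2==0):
--         for n in range(ln):
--             if(str[ln-n-1]==str[ln+n]):
--                 equ +=1
--             else:
--                 break
--     else:
--         for n in range(ln):
--             if(str[ln-n-1]==str[ln+n+1]):
--                 equ +=1
--             else:
--                 break
--     if equ == ln:
--         return 0
--     else:
--         return length-1
-- ===== SOURCE B (Python) =====
-- def countMin(str):
--     return 0 if str == str[::-1] else len(str) - 1
-- ===== Notes on version B (the rewrite author's own statement) =====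
-- stated objective: simpler
-- what changed: Replaced the parity-split center-out index loop with an early break and a match counter by a single reverse-and-compare: build str[::-1] once and return 0 on equality, else len(str)-1.
import Mathlib
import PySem

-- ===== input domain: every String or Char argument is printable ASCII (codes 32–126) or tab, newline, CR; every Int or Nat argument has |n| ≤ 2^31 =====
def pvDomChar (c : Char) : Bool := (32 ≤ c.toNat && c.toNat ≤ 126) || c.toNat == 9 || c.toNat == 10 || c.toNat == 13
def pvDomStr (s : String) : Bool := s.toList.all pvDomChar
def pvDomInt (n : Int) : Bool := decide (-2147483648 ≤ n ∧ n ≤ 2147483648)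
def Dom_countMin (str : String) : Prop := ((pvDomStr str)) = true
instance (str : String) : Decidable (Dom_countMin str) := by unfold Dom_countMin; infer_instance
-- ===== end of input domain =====

-- B replaces A's parity-split center-out loop (with early break and a match counter) by a
-- single reverse-and-compare; objective: simpler.

-- ===== PORT A =====
-- A's for-loop with break, counting consecutive matching pairs from the center outward.
-- `off` is 0 for the even-length loop (pair str[ln-n-1], str[ln+n]) and 1 for the odd one
-- (pair str[ln-n-1], str[ln+n+1]). Indices are always in range (0 ≤ ln-n-1, ln+n+off < length
-- for n < ln), so getD is exact for Python's str[i] here.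
def countMinLoop (l : List Char) (ln off n : Nat) : Nat :=
  if n < ln then
    if l.getD (ln - n - 1) ' ' = l.getD (ln + n + off) ' '
    then 1 + countMinLoop l ln off (n + 1)
    else 0
  else 0
termination_by ln - n

def countMin (str : String) : Int :=
  let l := str.toList
  let length := l.length
  let ln := length / 2
  let equ := if length % 2 = 0 then countMinLoop l ln 0 0 else countMinLoop l ln 1 0
  if equ = ln then 0 else (length : Int) - 1

-- ===== PORT B =====
-- str[::-1] is the reversed character list; whole-object equality, else len-1.
def countMin_alt (str : String) : Int :=
  let l := str.toList
  if l = l.reverse then 0 else (l.length : Int) - 1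

-- ===== PRECONDITION & SPEC =====
def Spec_countMin (str : String) (out : Int) : Prop := out = countMin_alt str
instance (str : String) (out : Int) : Decidable (Spec_countMin str out) := by unfold Spec_countMin; infer_instance

-- ===== CLAIM (what is proved, stated in full; the proofs are below) =====
def Claim_equal_countMin : Prop := ∀ (str : String), Dom_countMin str → Spec_countMin str (countMin str)

-- ===== LEMMAS AND PROOFS =====

-- The break-loop reaches the full count ln - n iff every remaining pair matches.
theorem countMinLoop_eq_iff (l : List Char) (ln off : Nat) :
    ∀ n, (countMinLoop l ln off n = ln - n ↔
      ∀ m, n ≤ m → m < ln → l.getD (ln - m - 1) ' ' = l.getD (ln + m + off) ' ') := by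
  intro n
  induction' h : ln - n with k ih generalizing n
  · rw [countMinLoop]
    simp only [show ¬ n < ln by omega, if_false]
    constructor
    · intro _ m hm hm'; omega
    · intro _; trivial
  · rw [countMinLoop]
    simp only [show n < ln by omega, if_true]
    have ih' := ih (n + 1) (by omega)
    by_cases hc : l.getD (ln - n - 1) ' ' = l.getD (ln + n + off) ' '
    · simp only [hc, if_true]
      constructor
      · intro he m hm hm'
        rcases Nat.eq_or_lt_of_le hm with rfl | hlt
        · exact hc
        · exact (ih'.mp (by omega)) m (by omega) hm'
      · intro hall
        have : countMinLoop l ln off (n + 1) = k :=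
          ih'.mpr (fun m hm hm' => hall m (by omega) hm')
        omega
    · simp only [hc, if_false]
      constructor
      · intro he; omega
      · intro hall; exact absurd (hall n (le_refl n) (by omega)) hc

-- A list equals its reverse iff every position matches its mirror.
theorem reverse_eq_iff (l : List Char) :
    l = l.reverse ↔ ∀ i, i < l.length → l.getD i ' ' = l.getD (l.length - 1 - i) ' ' := by
  constructor
  · intro h i hi
    conv_lhs => rw [h]
    rw [List.getD_eq_getElem _ _ (by simpa using hi),
        List.getD_eq_getElem _ _ (by omega)]
    simp [List.getElem_reverse]
  · intro h
    apply List.ext_getElem (by simp)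
    intro i h1 h2
    have := h i h1
    rw [List.getD_eq_getElem _ _ h1, List.getD_eq_getElem _ _ (by omega)] at this
    rw [this]
    simp [List.getElem_reverse]

-- The center-out pair condition (over the first half) is the full mirror condition.
theorem half_iff (l : List Char) (ln off : Nat)
    (hlen : l.length = 2 * ln + off) (hoff : off ≤ 1) :
    (∀ m, m < ln → l.getD (ln - m - 1) ' ' = l.getD (ln + m + off) ' ') ↔
    (∀ i, i < l.length → l.getD i ' ' = l.getD (l.length - 1 - i) ' ') := by
  constructor
  · intro h i hi
    by_cases hlo : i < ln
    · have := h (ln - 1 - i) (by omega)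
      have e1 : ln - (ln - 1 - i) - 1 = i := by omega
      have e2 : ln + (ln - 1 - i) + off = l.length - 1 - i := by omega
      rwa [e1, e2] at this
    · by_cases heq : l.length - 1 - i = i
      · rw [heq]
      · set j := l.length - 1 - i with hj
        have hjlt : j < ln := by omega
        have := h (ln - 1 - j) (by omega)
        have e1 : ln - (ln - 1 - j) - 1 = j := by omega
        have e2 : ln + (ln - 1 - j) + off = i := by omega
        rw [e1, e2] at this
        exact this.symm
  · intro h m hm
    have := h (ln - m - 1) (by omega)
    have e2 : l.length - 1 - (ln - m - 1) = ln + m + off := by omega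
    rwa [e2] at this

-- ===== VERDICT (by name: the statement is the Claim_ definition above) =====
theorem countMin_spec : Claim_equal_countMin := by
  intro str _
  unfold Spec_countMin countMin countMin_alt
  show (if (if str.toList.length % 2 = 0
            then countMinLoop str.toList (str.toList.length / 2) 0 0
            else countMinLoop str.toList (str.toList.length / 2) 1 0) = str.toList.length / 2
        then (0 : Int) else (str.toList.length : Int) - 1) =
       (if str.toList = str.toList.reverse then (0 : Int) else (str.toList.length : Int) - 1)
  have key : ∀ off, str.toList.length = 2 * (str.toList.length / 2) + off → off ≤ 1 →
      (countMinLoop str.toList (str.toList.length / 2) off 0 = str.toList.length / 2 ↔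
        str.toList = str.toList.reverse) := by
    intro off hoff hoff1
    have h1 := countMinLoop_eq_iff str.toList (str.toList.length / 2) off 0
    rw [Nat.sub_zero] at h1
    rw [h1, reverse_eq_iff str.toList]
    constructor
    · intro h
      exact (half_iff str.toList (str.toList.length / 2) off hoff hoff1).mp
        (fun m hm => h m (Nat.zero_le m) hm)
    · intro h
      exact fun m _ hm =>
        (half_iff str.toList (str.toList.length / 2) off hoff hoff1).mpr h m hm
  by_cases hpar : str.toList.length % 2 = 0
  · rw [if_pos hpar]
    have this1 := key 0 (by omega) (by omega)
    split_ifs with h1 h2 h2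
    · rfl
    · exact absurd (this1.mp h1) h2
    · exact absurd (this1.mpr h2) h1
    · rfl
  · rw [if_neg hpar]
    have this1 := key 1 (by omega) (by omega)
    split_ifs with h1 h2 h2
    · rfl
    · exact absurd (this1.mp h1) h2
    · exact absurd (this1.mpr h2) h1
    · rfl
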